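-- pv_equiv track=rewrite | github.com/ArnauInesUOC/python-b1-tema2-aula1-inesmarinarnau | 2a/ej2a1.py | sum_even_numbers_in_list_do_while
-- ===== SOURCE A (Python) =====
-- def sum_even_numbers_in_list_do_while(shopping_list):
--     sum_even = 0
--     for value in shopping_list:
--         if not isinstance(value, (int, float)):
--             raise ValueError("Los valores en la lista deben ser enteros")
--     i = 0
--     while True:
--         if i == len(shopping_list):
--             break
--         elif shopping_list[i] % 2 == 0:
--             sum_even += shopping_list[i]
--         i += 1
--     return sum_even
-- ===== SOURCE B (Python) =====
-- def sum_even_numbers_in_list_do_while(shopping_list):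
--     acc = 0
--     for value in shopping_list:
--         if not isinstance(value, (int, float)):
--             raise ValueError("Los valores en la lista deben ser enteros")
--         acc += value * (1 - value % 2)
--     return acc
-- ===== Notes on version B (the rewrite author's own statement) =====
-- stated objective: alternative
-- what changed: Replaces A's two staged passes (a validation loop, then an indexed while-True loop with an evenness branch) by a single fused pass that accumulates branch-free with the arithmetic mask value*(1 - value%2), which zeroes out odd integers since value%2 is 0 or 1.
import Mathlib
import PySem

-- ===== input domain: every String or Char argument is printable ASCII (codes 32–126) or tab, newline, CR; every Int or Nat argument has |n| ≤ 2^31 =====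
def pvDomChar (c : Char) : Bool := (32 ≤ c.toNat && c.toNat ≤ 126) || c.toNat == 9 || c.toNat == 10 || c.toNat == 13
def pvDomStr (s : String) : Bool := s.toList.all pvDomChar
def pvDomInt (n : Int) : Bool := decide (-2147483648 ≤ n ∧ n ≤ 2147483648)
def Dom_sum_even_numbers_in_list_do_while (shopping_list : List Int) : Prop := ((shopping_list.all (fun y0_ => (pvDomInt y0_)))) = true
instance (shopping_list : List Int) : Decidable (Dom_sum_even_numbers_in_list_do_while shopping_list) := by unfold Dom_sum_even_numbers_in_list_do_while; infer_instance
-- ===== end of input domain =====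

-- B fuses A's two staged passes into one branch-free pass accumulating value*(1 - value%2);
-- objective: alternative (no speed claim).

-- ===== PORT A =====
-- the 'while True' index loop; the fuel (list length + 1 suffices, since i starts at 0
-- and grows by 1 until it hits the length) only makes the recursion total
def pvA_while (xs : List Int) (fuel i : Nat) (sum_even : Int) : Int :=
  match fuel with
  | 0 => sum_even
  | fuel + 1 =>
    if i = xs.length then sum_even
    else if PySem.Int.mod (((PySem.List.pyGet? xs (i : Int)).getD 0)) 2 = 0 then
      -- pyGet? is exact here: 0 ≤ i < len, so the lookup is some; getD 0 never fires
      pvA_while xs fuel (i + 1) (sum_even + (PySem.List.pyGet? xs (i : Int)).getD 0)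
    else pvA_while xs fuel (i + 1) sum_even

def sum_even_numbers_in_list_do_while (shopping_list : List Int) : Int :=
  -- validation for-loop: 'isinstance(value, (int, float))' always holds for Int, so it is a no-op pass
  let _ := shopping_list.foldl (fun u _ => u) ()
  pvA_while shopping_list (shopping_list.length + 1) 0 0

-- ===== PORT B =====
def sum_even_numbers_in_list_do_while_alt (shopping_list : List Int) : Int :=
  -- single fused loop: validation (no-op on Int) + branch-free masked accumulation
  shopping_list.foldl (fun acc value => acc + value * (1 - PySem.Int.mod value 2)) 0

-- ===== PRECONDITION & SPEC =====
def Spec_sum_even_numbers_in_list_do_while (shopping_list : List Int) (out : Int) : Prop := out = sum_even_numbers_in_list_do_while_alt shopping_list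
instance (shopping_list : List Int) (out : Int) : Decidable (Spec_sum_even_numbers_in_list_do_while shopping_list out) := by unfold Spec_sum_even_numbers_in_list_do_while; infer_instance

-- ===== CLAIM (what is proved, stated in full; the proofs are below) =====
def Claim_equal_sum_even_numbers_in_list_do_while : Prop := ∀ (shopping_list : List Int), Dom_sum_even_numbers_in_list_do_while shopping_list → Spec_sum_even_numbers_in_list_do_while shopping_list (sum_even_numbers_in_list_do_while shopping_list)

-- ===== LEMMAS AND PROOFS =====
theorem pvA_while_eq (xs : List Int) (fuel i : Nat) (acc : Int)
    (hi : i ≤ xs.length) (hf : xs.length - i ≤ fuel) :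
    pvA_while xs fuel i acc
      = acc + ((xs.drop i).filter (fun v => PySem.Int.mod v 2 = 0)).sum := by
  induction fuel generalizing i acc with
  | zero =>
    have : i = xs.length := by omega
    simp [pvA_while, this]
  | succ fuel ih =>
    by_cases h : i = xs.length
    · simp [pvA_while, h]
    · have hlt : i < xs.length := by omega
      have hget : PySem.List.pyGet? xs (i : Int) = some xs[i] :=
        PySem.List.pyGet?_ofNat xs i hlt
      have hdrop : xs.drop i = xs[i] :: xs.drop (i + 1) := List.drop_eq_getElem_cons hlt
      by_cases hev : PySem.Int.mod xs[i] 2 = 0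
      · rw [pvA_while]; simp only [h, if_false, hget, Option.getD_some, hev, if_true]
        rw [ih (i + 1) _ (by omega) (by omega), hdrop, List.filter_cons]
        simp only [hev, decide_true, if_true, List.sum_cons]; ring
      · rw [pvA_while]; simp only [h, if_false, hget, Option.getD_some, hev, if_false]
        have hev' : ¬ (2 ∣ xs[i]) := by
          simpa [PySem.Int.mod_eq_zero_iff_dvd] using hev
        rw [ih (i + 1) _ (by omega) (by omega), hdrop, List.filter_cons]
        simp [hev']

theorem pvB_foldl_eq (xs : List Int) (acc : Int) :
    xs.foldl (fun acc value => acc + value * (1 - PySem.Int.mod value 2)) acc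
      = acc + (xs.filter (fun v => PySem.Int.mod v 2 = 0)).sum := by
  induction xs generalizing acc with
  | nil => simp
  | cons x xs ih =>
    simp only [List.foldl_cons, List.filter_cons, ih]
    rcases PySem.Int.mod_two_eq x with h | h
    · rw [if_pos (by rw [h]; simp), List.sum_cons]
      simp only [h]; ring
    · rw [if_neg (by rw [h]; simp)]
      simp only [h]; ring

-- ===== VERDICT (by name: the statement is the Claim_ definition above) =====
theorem sum_even_numbers_in_list_do_while_spec : Claim_equal_sum_even_numbers_in_list_do_while := by
  intro xs _
  unfold Spec_sum_even_numbers_in_list_do_while sum_even_numbers_in_list_do_while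
    sum_even_numbers_in_list_do_while_alt
  rw [pvA_while_eq xs (xs.length + 1) 0 0 (by omega) (by omega), pvB_foldl_eq]
  simp
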